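-- pv_equiv track=rewrite | github.com/Mr-Cu/SoftwareTesting_Homework_backend | atmsystem/atmsystem.py | printer_atom
-- ===== SOURCE A (Python) =====
-- def printer_atom(arg_list):
--     command = arg_list[0];
--     curstate = "Initial";
--     curstep = 0;
--
--     for cmd in command:
--         if (curstep == 0):
--             if (cmd == "S"):
--                 curstep = 1;
--                 curstate = "Login";
--                 continue;
--             else:
--                 break;
--         if (curstep == 1):
--             if (cmd == "1" and curstate == "Login"):
--                 curstep = 2;
--                 curstate = "Choosing";
--                 continue;
--             elif (cmd == "2" and curstate == "Login"):
--                 curstate = "Login";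
--                 continue;
--             elif (cmd == "G" and curstate == "Login"):
--                 curstep = 2;
--                 curstate = "Exit";
--                 continue;
--             else:
--                 curstate = "Failure";
--                 break;
--         if (curstep == 2):
--             if (cmd == "3" and curstate == "Choosing"):
--                 curstep = 3;
--                 curstate = "AlterCode";
--                 continue;
--             elif (cmd == "6" and curstate == "Choosing"):
--                 curstep = 3;
--                 curstate = "Deposit";
--                 continue;
--             elif (cmd == "8" and curstate == "Choosing"):
--                 curstep = 3;
--                 curstate = "Withdrawal";
--                 continue;
--             elif (cmd == "A" and curstate == "Choosing"):
--                 curstep = 3;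
--                 curstate = "Transfer";
--                 continue;
--             elif (cmd == "C" and curstate == "Choosing"):
--                 curstep = 3;
--                 curstate = "Inquiry";
--                 continue;
--             elif (cmd == "G" and curstate == "Choosing"):
--                 curstep = 3;
--                 curstate = "Exit";
--                 continue;
--             elif (cmd == "E" and curstate == "Exit"):
--                 curstep = 3;
--                 curstate = "End";
--                 break;
--             else:
--                 curstate = "Failure";
--                 break;
--         if (curstep == 3):
--             if (cmd == "5" and curstate == "AlterCode"):
--                 curstep = 4;
--                 curstate = "AlterCode";
--                 break;
--             elif (cmd == "4" and curstate == "AlterCode"):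
--                 curstep = 4;
--                 curstate = "Login";
--                 break;
--             elif (cmd == "7" and curstate == "Deposit"):
--                 curstep = 4;
--                 curstate = "Choosing";
--                 break;
--             elif (cmd == "9" and curstate == "Withdrawal"):
--                 curstep = 4;
--                 curstate = "Choosing";
--                 break;
--             elif (cmd == "B" and curstate == "Transfer"):
--                 curstep = 4;
--                 curstate = "Choosing";
--                 break;
--             elif (cmd == "D" and curstate == "Inquiry"):
--                 curstep = 4;
--                 curstate = "Choosing";
--                 break;
--             elif (cmd == "E" and curstate == "Exit"):
--                 curstep = 4;
--                 curstate = "End";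
--                 break;
--             else:
--                 curstate = "Failure";
--                 break;
--         if (curstep == 4):
--             curstate = "Failure";
--             break;
--
--     return curstate;
-- ===== SOURCE B (Python) =====
-- # Prefix parsing instead of an FSM loop: the valid commands form a fixed-depth
-- # regular pattern "S 2* [1 x [y]] | S 2* G [E]" -- strip the repeatable part with
-- # lstrip and decide the result by looking at (at most) the next three characters.
--
-- STEP2 = {"3": "AlterCode", "6": "Deposit", "8": "Withdrawal",
--          "A": "Transfer", "C": "Inquiry", "G": "Exit"}
-- STEP3 = {("AlterCode", "5"): "AlterCode", ("AlterCode", "4"): "Login",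
--          ("Deposit", "7"): "Choosing", ("Withdrawal", "9"): "Choosing",
--          ("Transfer", "B"): "Choosing", ("Inquiry", "D"): "Choosing",
--          ("Exit", "E"): "End"}
--
-- def printer_atom(arg_list):
--     s = arg_list[0]
--     if not s.startswith("S"):
--         return "Initial"
--     t = s[1:].lstrip("2")          # '2' re-enters Login, so leading 2s are noise
--     if t == "":
--         return "Login"
--     if t[0] == "1":
--         u = t[1:]
--         if u == "":
--             return "Choosing"
--         st = STEP2.get(u[0])
--         if st is None:
--             return "Failure"
--         if len(u) == 1:
--             return st
--         return STEP3.get((st, u[1]), "Failure")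
--     if t[0] == "G":
--         if len(t) == 1:
--             return "Exit"
--         return "End" if t[1] == "E" else "Failure"
--     return "Failure"
-- ===== Notes on version B (the rewrite author's own statement) =====
-- stated objective: alternative
-- what changed: Replaced the per-character FSM loop with fixed-depth prefix parsing: the only repeatable transition ('2' re-entering Login) is removed with lstrip, after which the result is decided by inspecting at most three remaining characters via two lookup tables, with no loop and no step counter.
import Mathlib
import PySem

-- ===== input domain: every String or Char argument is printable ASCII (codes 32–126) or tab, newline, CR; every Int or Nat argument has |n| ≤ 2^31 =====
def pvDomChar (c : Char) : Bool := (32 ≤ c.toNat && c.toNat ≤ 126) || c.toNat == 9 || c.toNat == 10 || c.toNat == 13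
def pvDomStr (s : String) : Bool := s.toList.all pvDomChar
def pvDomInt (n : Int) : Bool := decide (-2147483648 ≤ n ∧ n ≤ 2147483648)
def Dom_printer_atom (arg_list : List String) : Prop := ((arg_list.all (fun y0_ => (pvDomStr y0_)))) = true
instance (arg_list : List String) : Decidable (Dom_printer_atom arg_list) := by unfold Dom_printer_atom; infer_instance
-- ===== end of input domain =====

-- B replaces A's per-character FSM loop by fixed-depth prefix parsing: lstrip the only
-- repeatable command ('2'), then decide from at most three remaining characters (alternative).

-- ===== PORT A =====
-- the for-loop of A over the command's characters; state = (curstep, curstate);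
-- 'break' returns the current curstate, 'continue' recurses on the tail
def printer_atom_loopA : List Char → Int → String → String
  | [], _, st => st
  | c :: cs, step, st =>
    if step == 0 then
      (if c == 'S' then printer_atom_loopA cs 1 "Login" else st)
    else if step == 1 then
      (if c == '1' && st == "Login" then printer_atom_loopA cs 2 "Choosing"
       else if c == '2' && st == "Login" then printer_atom_loopA cs 1 "Login"
       else if c == 'G' && st == "Login" then printer_atom_loopA cs 2 "Exit"
       else "Failure")
    else if step == 2 then
      (if c == '3' && st == "Choosing" then printer_atom_loopA cs 3 "AlterCode"
       else if c == '6' && st == "Choosing" then printer_atom_loopA cs 3 "Deposit"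
       else if c == '8' && st == "Choosing" then printer_atom_loopA cs 3 "Withdrawal"
       else if c == 'A' && st == "Choosing" then printer_atom_loopA cs 3 "Transfer"
       else if c == 'C' && st == "Choosing" then printer_atom_loopA cs 3 "Inquiry"
       else if c == 'G' && st == "Choosing" then printer_atom_loopA cs 3 "Exit"
       else if c == 'E' && st == "Exit" then "End"
       else "Failure")
    else if step == 3 then
      (if c == '5' && st == "AlterCode" then "AlterCode"
       else if c == '4' && st == "AlterCode" then "Login"
       else if c == '7' && st == "Deposit" then "Choosing"
       else if c == '9' && st == "Withdrawal" then "Choosing"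
       else if c == 'B' && st == "Transfer" then "Choosing"
       else if c == 'D' && st == "Inquiry" then "Choosing"
       else if c == 'E' && st == "Exit" then "End"
       else "Failure")
    else if step == 4 then "Failure"
    else printer_atom_loopA cs step st

def printer_atom (arg_list : List String) : String :=
  -- arg_list[0]: IndexError on [] is excluded by Pre_printer_atom; getD "" there
  let command := (PySem.List.pyGet? arg_list 0).getD ""
  printer_atom_loopA command.toList 0 "Initial"

-- ===== PORT B =====
-- Source B's STEP2 / STEP3 tables; Python's one-character strings are ported as Char
def pvStep2 : PySem.Dict Char String :=
  PySem.Dict.ofList [('3', "AlterCode"), ('6', "Deposit"), ('8', "Withdrawal"),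
                     ('A', "Transfer"), ('C', "Inquiry"), ('G', "Exit")]
def pvStep3 : PySem.Dict (String × Char) String :=
  PySem.Dict.ofList [(("AlterCode", '5'), "AlterCode"), (("AlterCode", '4'), "Login"),
                     (("Deposit", '7'), "Choosing"), (("Withdrawal", '9'), "Choosing"),
                     (("Transfer", 'B'), "Choosing"), (("Inquiry", 'D'), "Choosing"),
                     (("Exit", 'E'), "End")]

-- the straight-line returns of Source B after 't = s[1:].lstrip("2")', on t's characters
def printer_atom_tail : List Char → String
  | [] => "Login"
  | c :: u =>
    if c == '1' then
      match u with
      | [] => "Choosing"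
      | d :: rest =>
        match PySem.Dict.get? pvStep2 d with
        | none => "Failure"
        | some st =>
          match rest with
          | [] => st
          | e :: _ => PySem.Dict.getD pvStep3 (st, e) "Failure"
    else if c == 'G' then
      match u with
      | [] => "Exit"
      | e :: _ => if e == 'E' then "End" else "Failure"
    else "Failure"

def printer_atom_alt (arg_list : List String) : String :=
  let s := (PySem.List.pyGet? arg_list 0).getD ""
  if !(PySem.Str.startswith s "S") then "Initial"
  else
    -- s[1:].lstrip("2") is exact as dropWhile (· == '2') on the char list after the head
    printer_atom_tail ((s.toList.drop 1).dropWhile (· == '2'))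

-- ===== PRECONDITION & SPEC =====
-- A does arg_list[0]: it raises IndexError on the empty list (so does B); only that is excluded.
def Pre_printer_atom (arg_list : List String) : Prop := arg_list ≠ []
instance (arg_list : List String) : Decidable (Pre_printer_atom arg_list) := by unfold Pre_printer_atom; infer_instance
def pvWitness_printer_atom : List String := ["S1G E"]

def Spec_printer_atom (arg_list : List String) (out : String) : Prop := out = printer_atom_alt arg_list
instance (arg_list : List String) (out : String) : Decidable (Spec_printer_atom arg_list out) := by unfold Spec_printer_atom; infer_instance

-- ===== CLAIM (what is proved, stated in full; the proofs are below) =====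
def Claim_equal_printer_atom : Prop := ∀ (arg_list : List String), Dom_printer_atom arg_list → Pre_printer_atom arg_list → Spec_printer_atom arg_list (printer_atom arg_list)

-- ===== LEMMAS AND PROOFS =====

theorem pvStep2_items : pvStep2.items =
    [('3', "AlterCode"), ('6', "Deposit"), ('8', "Withdrawal"),
     ('A', "Transfer"), ('C', "Inquiry"), ('G', "Exit")] := rfl
theorem pvStep3_items : pvStep3.items =
    [(("AlterCode", '5'), "AlterCode"), (("AlterCode", '4'), "Login"),
     (("Deposit", '7'), "Choosing"), (("Withdrawal", '9'), "Choosing"),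
     (("Transfer", 'B'), "Choosing"), (("Inquiry", 'D'), "Choosing"),
     (("Exit", 'E'), "End")] := rfl

-- A's loop at step 3 in state st (one of the six reachable ones) is B's STEP3 lookup
theorem loopA3_eq (st : String)
    (hst : st = "AlterCode" ∨ st = "Deposit" ∨ st = "Withdrawal" ∨ st = "Transfer" ∨ st = "Inquiry" ∨ st = "Exit") :
    ∀ cs : List Char, printer_atom_loopA cs 3 st =
      (match cs with
       | [] => st
       | e :: _ => PySem.Dict.getD pvStep3 (st, e) "Failure") := by
  intro cs
  cases cs with
  | nil => rcases hst with rfl | rfl | rfl | rfl | rfl | rfl <;> rfl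
  | cons e rest =>
    rcases hst with rfl | rfl | rfl | rfl | rfl | rfl
    · by_cases h1 : e = '5'
      · subst h1; rfl
      by_cases h2 : e = '4'
      · subst h2; rfl
      simp [printer_atom_loopA, PySem.Dict.getD, PySem.Dict.get?, pvStep3_items,
            List.find?_cons_of_neg, h1, h2, Ne.symm h1, Ne.symm h2]
    · by_cases h1 : e = '7'
      · subst h1; rfl
      simp [printer_atom_loopA, PySem.Dict.getD, PySem.Dict.get?, pvStep3_items,
            List.find?_cons_of_neg, h1, Ne.symm h1]
    · by_cases h1 : e = '9'
      · subst h1; rfl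
      simp [printer_atom_loopA, PySem.Dict.getD, PySem.Dict.get?, pvStep3_items,
            List.find?_cons_of_neg, h1, Ne.symm h1]
    · by_cases h1 : e = 'B'
      · subst h1; rfl
      simp [printer_atom_loopA, PySem.Dict.getD, PySem.Dict.get?, pvStep3_items,
            List.find?_cons_of_neg, h1, Ne.symm h1]
    · by_cases h1 : e = 'D'
      · subst h1; rfl
      simp [printer_atom_loopA, PySem.Dict.getD, PySem.Dict.get?, pvStep3_items,
            List.find?_cons_of_neg, h1, Ne.symm h1]
    · by_cases h1 : e = 'E'
      · subst h1; rfl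
      simp [printer_atom_loopA, PySem.Dict.getD, PySem.Dict.get?, pvStep3_items,
            List.find?_cons_of_neg, h1, Ne.symm h1]

-- A's loop at step 2 in state "Choosing" is B's STEP2-then-STEP3 lookup
theorem loopA2C_eq : ∀ cs : List Char, printer_atom_loopA cs 2 "Choosing" =
    (match cs with
     | [] => "Choosing"
     | d :: rest =>
       match PySem.Dict.get? pvStep2 d with
       | none => "Failure"
       | some st =>
         match rest with
         | [] => st
         | e :: _ => PySem.Dict.getD pvStep3 (st, e) "Failure") := by
  intro cs
  cases cs with
  | nil => rfl
  | cons d rest =>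
    by_cases h1 : d = '3'
    · subst h1
      simpa [printer_atom_loopA] using loopA3_eq "AlterCode" (by simp) rest
    by_cases h2 : d = '6'
    · subst h2
      simpa [printer_atom_loopA] using loopA3_eq "Deposit" (by simp) rest
    by_cases h3 : d = '8'
    · subst h3
      simpa [printer_atom_loopA] using loopA3_eq "Withdrawal" (by simp) rest
    by_cases h4 : d = 'A'
    · subst h4
      simpa [printer_atom_loopA] using loopA3_eq "Transfer" (by simp) rest
    by_cases h5 : d = 'C'
    · subst h5
      simpa [printer_atom_loopA] using loopA3_eq "Inquiry" (by simp) rest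
    by_cases h6 : d = 'G'
    · subst h6
      simpa [printer_atom_loopA] using loopA3_eq "Exit" (by simp) rest
    simp [printer_atom_loopA, PySem.Dict.get?, pvStep2_items, List.find?_cons_of_neg,
          h1, h2, h3, h4, h5, h6, Ne.symm h1, Ne.symm h2, Ne.symm h3, Ne.symm h4,
          Ne.symm h5, Ne.symm h6]

-- A's loop at step 2 in state "Exit" is Source B's 'G' branch
theorem loopA2E_eq : ∀ cs : List Char, printer_atom_loopA cs 2 "Exit" =
    (match cs with
     | [] => "Exit"
     | e :: _ => if e == 'E' then "End" else "Failure") := by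
  intro cs
  cases cs with
  | nil => rfl
  | cons e rest =>
    by_cases h1 : e = 'E'
    · subst h1; rfl
    simp [printer_atom_loopA, h1]

-- A's loop at step 1 in state "Login" is B's tail parse after the lstrip
theorem loopA1_eq : ∀ cs : List Char,
    printer_atom_loopA cs 1 "Login" = printer_atom_tail (cs.dropWhile (· == '2')) := by
  intro cs
  induction cs with
  | nil => rfl
  | cons c cs ih =>
    by_cases h2 : c = '2'
    · subst h2
      simpa [printer_atom_loopA, List.dropWhile] using ih
    by_cases h1 : c = '1'
    · subst h1
      simp only [printer_atom_loopA, List.dropWhile]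
      simpa [printer_atom_tail] using loopA2C_eq cs
    by_cases hG : c = 'G'
    · subst hG
      simp only [printer_atom_loopA, List.dropWhile]
      simpa [printer_atom_tail] using loopA2E_eq cs
    simp [printer_atom_loopA, printer_atom_tail, List.dropWhile, h1, hG,
          beq_eq_false_iff_ne.mpr h2]

-- the whole loop against Source B's parse, for any command string
theorem loopA0_eq (s : String) :
    printer_atom_loopA s.toList 0 "Initial" =
      (if !(PySem.Str.startswith s "S") then "Initial"
       else printer_atom_tail ((s.toList.drop 1).dropWhile (· == '2'))) := by
  rw [PySem.Str.startswith_eq]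
  cases hl : s.toList with
  | nil => rfl
  | cons c cs =>
    by_cases hc : c = 'S'
    · subst hc
      simpa [printer_atom_loopA, PySem.Chars.startswith] using loopA1_eq cs
    · simp only [printer_atom_loopA, PySem.Chars.startswith]
      simp [hc]
      exact fun h => absurd h.symm hc

-- ===== VERDICT (by name: the statement is the Claim_ definition above) =====
theorem printer_atom_spec : Claim_equal_printer_atom := by
  intro arg_list _ _
  unfold Spec_printer_atom printer_atom printer_atom_alt
  exact loopA0_eq _
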